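-- pv_equiv track=rewrite | github.com/Lohnahmin/IowaState_CS1270 | Assignment#5/practice.py | neighborSum
-- ===== SOURCE A (Python) =====
-- def neighborSum(s):
--     freq = {}
--     for i in range(len(s)):
--         if i == 0 or i == len(s)-1:
--             continue
--         sum = s[i -1] + s[i + 1]
--         freq[i] = sum
--     return freq
-- ===== SOURCE B (Python) =====
-- def neighborSum(s):
--     # Stage 1: prefix-sum table P with P[k] = sum of the first k elements.
--     P = [0]
--     for x in s:
--         P.append(P[-1] + x)
--     # Stage 2: neighbor sum via differences of prefix sums:
--     # s[i-1] + s[i+1] = (P[i+2] - P[i-1]) - s[i].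
--     return {i: P[i + 2] - P[i - 1] - s[i] for i in range(1, len(s) - 1)}
-- ===== Notes on version B (the rewrite author's own statement) =====
-- stated objective: alternative
-- what changed: Replaces the direct neighbor addition inside an endpoint-guarded index loop by a two-stage prefix-sum algorithm: first build a running-sum table P, then obtain each interior value as the window difference P[i+2]-P[i-1] minus s[i].
import Mathlib
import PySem

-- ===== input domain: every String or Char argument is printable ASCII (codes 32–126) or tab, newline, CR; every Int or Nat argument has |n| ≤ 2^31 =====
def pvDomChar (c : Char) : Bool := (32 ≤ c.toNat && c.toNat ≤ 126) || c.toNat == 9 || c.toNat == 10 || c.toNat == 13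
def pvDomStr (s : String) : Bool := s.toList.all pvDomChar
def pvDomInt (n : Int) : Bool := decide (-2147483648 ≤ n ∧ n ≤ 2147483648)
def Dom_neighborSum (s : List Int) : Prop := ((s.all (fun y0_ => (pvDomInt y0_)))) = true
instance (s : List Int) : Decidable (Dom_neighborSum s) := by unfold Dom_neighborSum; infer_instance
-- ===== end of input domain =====

-- B computes each interior value from a prefix-sum table (P[i+2]-P[i-1]-s[i]) built in a
-- first pass, instead of A's endpoint-guarded index loop adding the two neighbors directly.

-- ===== PORT A =====
def neighborSum (s : List Int) : List (Int × Int) :=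
  ((PySem.List.pyRange 0 (s.length : Int) 1).foldl (fun freq i =>
      if i = 0 ∨ i = (s.length : Int) - 1 then freq
      else freq.insert i (PySem.List.pyGetD s (i - 1) 0 + PySem.List.pyGetD s (i + 1) 0))
    PySem.Dict.empty).items

-- ===== PORT B =====
def neighborSum_alt (s : List Int) : List (Int × Int) :=
  let P := s.foldl (fun P x => P ++ [PySem.List.pyGetD P (-1) 0 + x]) [(0 : Int)]
  (PySem.List.pyRange 1 ((s.length : Int) - 1) 1).map
    (fun i => (i, PySem.List.pyGetD P (i + 2) 0 - PySem.List.pyGetD P (i - 1) 0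
                    - PySem.List.pyGetD s i 0))

-- ===== PRECONDITION & SPEC =====
def Spec_neighborSum (s : List Int) (out : List (Int × Int)) : Prop := out = neighborSum_alt s
instance (s : List Int) (out : List (Int × Int)) : Decidable (Spec_neighborSum s out) := by unfold Spec_neighborSum; infer_instance

-- ===== CLAIM (what is proved, stated in full; the proofs are below) =====
def Claim_equal_neighborSum : Prop := ∀ (s : List Int), Dom_neighborSum s → Spec_neighborSum s (neighborSum s)

-- ===== LEMMAS AND PROOFS =====

-- the canonical result both programs compute: [(i, s[i-1]+s[i+1]) for i in 1..len-2]
def nsMid (s : List Int) : List (Int × Int) :=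
  (PySem.List.pyRange 1 ((s.length : Int) - 1) 1).map
    (fun i => (i, PySem.List.pyGetD s (i - 1) 0 + PySem.List.pyGetD s (i + 1) 0))

theorem nsA_eq_mid (s : List Int) : neighborSum s = nsMid s := by
  unfold neighborSum nsMid
  by_cases h2 : 2 ≤ s.length
  · have hn : (2:Int) ≤ (s.length : Int) := by exact_mod_cast h2
    have h01 : PySem.List.pyRange (0:Int) 1 1 = [0] := by decide
    rw [PySem.List.pyRange_one_append 0 1 (s.length : Int) (by omega) (by omega), h01,
        PySem.List.pyRange_one_append 1 ((s.length : Int) - 1) (s.length : Int) (by omega) (by omega)]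
    have hlast : PySem.List.pyRange ((s.length : Int) - 1) (s.length : Int) 1
        = [(s.length : Int) - 1] := by
      have := PySem.List.pyRange_one_singleton ((s.length : Int) - 1)
      simpa using this
    rw [hlast, List.foldl_append, List.foldl_append]
    simp only [List.foldl_cons, List.foldl_nil]
    simp only [true_or, or_true, if_true]
    have hcong :
        List.foldl
          (fun (freq : PySem.Dict Int Int) i =>
            if i = 0 ∨ i = (s.length : Int) - 1 then freq
            else freq.insert i (PySem.List.pyGetD s (i - 1) 0 + PySem.List.pyGetD s (i + 1) 0))
          PySem.Dict.empty (PySem.List.pyRange 1 ((s.length : Int) - 1) 1)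
        = List.foldl
          (fun (freq : PySem.Dict Int Int) i =>
            freq.insert i (PySem.List.pyGetD s (i - 1) 0 + PySem.List.pyGetD s (i + 1) 0))
          PySem.Dict.empty (PySem.List.pyRange 1 ((s.length : Int) - 1) 1) := by
      apply PySem.List.foldl_congr_mem
      intro acc x hx
      rw [PySem.List.mem_pyRange_one] at hx
      rw [if_neg (by omega)]
    have hfresh :
        (List.foldl
          (fun (freq : PySem.Dict Int Int) i =>
            freq.insert i (PySem.List.pyGetD s (i - 1) 0 + PySem.List.pyGetD s (i + 1) 0))
          PySem.Dict.empty (PySem.List.pyRange 1 ((s.length : Int) - 1) 1)).items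
        = PySem.Dict.empty.items ++ (PySem.List.pyRange 1 ((s.length : Int) - 1) 1).map
            (fun i => (i, PySem.List.pyGetD s (i - 1) 0 + PySem.List.pyGetD s (i + 1) 0)) := by
      apply PySem.Dict.items_foldl_insert_fresh
      · intro a _; simp
      · simpa using PySem.List.nodup_pyRange_one 1 ((s.length : Int) - 1)
    rw [hcong, hfresh]
    rfl
  · have h01 : PySem.List.pyRange (0:Int) 1 1 = [0] := by decide
    interval_cases hl : s.length
    · rw [PySem.List.pyRange_one_eq_nil (by omega), PySem.List.pyRange_one_eq_nil (by omega)]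
      rfl
    · rw [(by norm_num : ((1:Nat):Int) = 1), h01, PySem.List.pyRange_one_eq_nil (by omega)]
      simp
      rfl

-- running sums of s starting from accumulated value a
def psums (a : Int) : List Int → List Int
  | [] => []
  | x :: xs => (a + x) :: psums (a + x) xs

theorem foldl_psums : ∀ (s P0 : List Int) (a : Int), P0 ≠ [] →
    PySem.List.pyGetD P0 (-1) 0 = a →
    s.foldl (fun P x => P ++ [PySem.List.pyGetD P (-1) 0 + x]) P0 = P0 ++ psums a s := by
  intro s
  induction s with
  | nil => intro P0 a _ _; simp [psums]
  | cons x xs ih =>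
    intro P0 a h0 ha
    simp only [List.foldl_cons, ha, psums]
    rw [ih (P0 ++ [a + x]) (a + x) (by simp)
        (PySem.List.pyGetD_neg_one_append_singleton P0 (a + x) 0)]
    simp

theorem psums_getD : ∀ (s : List Int) (a : Int) (k : Nat), k < s.length →
    (psums a s).getD k 0 = a + (s.take (k + 1)).sum := by
  intro s
  induction s with
  | nil => intro a k hk; simp at hk
  | cons x xs ih =>
    intro a k hk
    cases k with
    | zero => simp [psums]
    | succ k =>
      simp only [psums, List.getD_cons_succ, List.take_succ_cons, List.sum_cons]
      rw [ih (a + x) k (by simpa using hk)]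
      ring

theorem P_getD (s : List Int) (m : Nat) (hm : m ≤ s.length) :
    (0 :: psums 0 s).getD m 0 = (s.take m).sum := by
  cases m with
  | zero => simp
  | succ m => simpa using psums_getD s 0 m (by omega)

theorem sum_take_sub (s : List Int) (j : Nat) (hj : j + 2 < s.length) :
    (s.take (j + 3)).sum - (s.take j).sum - s.getD (j + 1) 0
      = s.getD j 0 + s.getD (j + 2) 0 := by
  have h0 : j < s.length := by omega
  have h1 : j + 1 < s.length := by omega
  have e1 := List.sum_take_succ s j h0
  have e2 := List.sum_take_succ s (j + 1) h1
  have e3 := List.sum_take_succ s (j + 2) hj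
  rw [show j + 1 + 1 = j + 2 by omega] at e2
  rw [show j + 2 + 1 = j + 3 by omega] at e3
  simp only [List.getD_eq_getElem?_getD, List.getElem?_eq_getElem, h0, h1, hj,
    Option.getD_some]
  omega

theorem nsB_eq_mid (s : List Int) : neighborSum_alt s = nsMid s := by
  unfold neighborSum_alt nsMid
  rw [foldl_psums s [0] 0 (by simp) (by decide)]
  apply List.map_congr_left
  intro i hi
  rw [PySem.List.mem_pyRange_one] at hi
  obtain ⟨k, rfl⟩ : ∃ k : Nat, i = ((k + 1 : Nat) : Int) :=
    ⟨(i - 1).toNat, by omega⟩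
  have hk : k + 1 + 1 < s.length := by omega
  have e2 : ((k + 1 : Nat) : Int) + 2 = ((k + 3 : Nat) : Int) := by push_cast; ring
  have e1 : ((k + 1 : Nat) : Int) - 1 = ((k : Nat) : Int) := by push_cast; ring
  rw [e2, e1, PySem.List.pyGetD_natCast, PySem.List.pyGetD_natCast, PySem.List.pyGetD_natCast]
  have hP : ([0] ++ psums 0 s : List Int) = 0 :: psums 0 s := rfl
  rw [hP, P_getD s (k + 3) (by omega), P_getD s k (by omega)]
  have := sum_take_sub s k (by omega)
  simp only [Prod.mk.injEq]
  refine ⟨trivial, ?_⟩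
  rw [this]
  have f2 : ((k + 1 : Nat) : Int) + 1 = ((k + 2 : Nat) : Int) := by push_cast; ring
  rw [f2, PySem.List.pyGetD_natCast, PySem.List.pyGetD_natCast]

-- ===== VERDICT (by name: the statement is the Claim_ definition above) =====
theorem neighborSum_spec : Claim_equal_neighborSum := by
  intro s _
  show neighborSum s = neighborSum_alt s
  rw [nsA_eq_mid, nsB_eq_mid]
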